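-- pv_equiv track=rewrite | github.com/mkobayashi/naturalquest | convert_wordpress_to_astro.py | extract_item_blocks
-- ===== SOURCE A (Python) =====
-- from typing import List
--
-- def extract_item_blocks(xml_content: str) -> List[str]:
--     """
--     XML から <item>...</item> ブロックを抽出する。
--     CDATA 内の <item> / </item> は無視して、正しくネストを追跡する。
--     """
--     items = []
--     i = 0
--     depth = 0
--     start = -1
--     n = len(xml_content)
--
--     while i < n:
--         # CDATA セクションをスキップ（ここを先にチェック）
--         if i <= n - 9 and xml_content[i:i + 9] == "<![CDATA[":
--             i += 9
--             while i < n - 2: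
--                 if xml_content[i:i + 3] == "]]>":
--                     i += 3
--                     break
--                 i += 1
--             continue
--
--         # <item> タグ（開始）- 前の文字が < または空白
--         if i <= n - 6 and xml_content[i:i + 6] == "<item>":
--             if depth == 0:
--                 start = i
--             depth += 1
--             i += 6
--             continue
--
--         # </item> タグ（終了）
--         if i <= n - 7 and xml_content[i:i + 7] == "</item>":
--             depth -= 1
--             if depth == 0 and start >= 0:
--                 items.append(xml_content[start : i + 7])
--                 start = -1
--             i += 7
--             continue
--
--         i += 1
--
--     return items
-- ===== SOURCE B (Python) =====
-- from typing import List
--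
-- _MARKERS = ("<![CDATA[", "]]>", "<item>", "</item>")
--
-- def _marker_events(s: str) -> list:
--     """First pass: ordered list of (position, marker) for every non-overlapping
--     marker occurrence, found left to right with no other state."""
--     events = []
--     i = 0
--     n = len(s)
--     while i < n:
--         for tok in _MARKERS:
--             if s.startswith(tok, i):
--                 events.append((i, tok))
--                 i += len(tok)
--                 break
--         else:
--             i += 1
--     return events
--
-- def extract_item_blocks(xml_content: str) -> List[str]:
--     """Second pass: interpret the marker events with CDATA/depth/start state."""
--     items = []
--     inside_cdata = False
--     depth = 0
--     start = -1
--     for pos, tok in _marker_events(xml_content):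
--         if inside_cdata:
--             if tok == "]]>":
--                 inside_cdata = False
--         elif tok == "<![CDATA[":
--             inside_cdata = True
--         elif tok == "<item>":
--             if depth == 0:
--                 start = pos
--             depth += 1
--         elif tok == "</item>":
--             depth -= 1
--             if depth == 0 and start >= 0:
--                 items.append(xml_content[start:pos + 7])
--                 start = -1
--     return items
-- ===== Notes on version B (the rewrite author's own statement) =====
-- stated objective: alternative
-- what changed: A's fused char-by-char state machine (with a nested CDATA-skipping loop and depth/start tracking interleaved into the scan) is split into two passes: a stateless tokenizer that collects an ordered event list of the positions of the four markers (CDATA open, CDATA close, item open, item close), and a separate interpreter over that event list maintaining inside_cdata/depth/start.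
import Mathlib
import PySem

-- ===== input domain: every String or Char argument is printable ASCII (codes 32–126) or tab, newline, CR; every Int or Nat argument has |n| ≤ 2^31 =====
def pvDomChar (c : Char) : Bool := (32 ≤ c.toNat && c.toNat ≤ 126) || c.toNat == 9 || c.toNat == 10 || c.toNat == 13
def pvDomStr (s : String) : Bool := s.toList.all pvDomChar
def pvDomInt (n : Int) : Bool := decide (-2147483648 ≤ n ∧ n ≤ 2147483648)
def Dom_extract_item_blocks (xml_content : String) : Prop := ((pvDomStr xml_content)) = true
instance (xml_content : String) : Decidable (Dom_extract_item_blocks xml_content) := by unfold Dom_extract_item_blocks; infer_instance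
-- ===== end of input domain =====

-- B replaces A's fused char-by-char state machine by a two-pass decomposition (marker tokenizer, then an event interpreter); same cost, proved to return the same list.

-- ===== PORT A =====
-- the four marker strings, as char lists (shared constants of both ports)
def patCOpen : List Char := ['<', '!', '[', 'C', 'D', 'A', 'T', 'A', '[']
def patCClose : List Char := [']', ']', '>']
def patIOpen : List Char := ['<', 'i', 't', 'e', 'm', '>']
def patIClose : List Char := ['<', '/', 'i', 't', 'e', 'm', '>']

-- Python's `xml_content[i:i+k] == pat` (A) / `xml_content.startswith(pat, i)` (B):
-- the slice equality already implies the redundant length guard `i <= n - k` A also writes.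
def mAt (cs : List Char) (i : Nat) (pat : List Char) : Bool := pat.isPrefixOf (cs.drop i)

-- A's inner `while i < n - 2: ...` loop skipping to just past "]]>" (returns the new i)
def cdataScanA (cs : List Char) (i : Nat) : Nat :=
  if i < cs.length - 2 then
    if mAt cs i patCClose then i + 3 else cdataScanA cs (i + 1)
  else i
termination_by cs.length - i
decreasing_by omega

theorem cdataScanA_ge (cs : List Char) (i : Nat) : i ≤ cdataScanA cs i := by
  fun_induction cdataScanA cs i <;> omega

-- A's outer `while i < n` loop; depth and start are Python ints (start sentinel -1)
def loopA (cs : List Char) (i : Nat) (depth start : Int) (items : List String) : List String :=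
  if i < cs.length then
    if mAt cs i patCOpen then
      loopA cs (cdataScanA cs (i + 9)) depth start items
    else if mAt cs i patIOpen then
      loopA cs (i + 6) (depth + 1) (if depth = 0 then (i : Int) else start) items
    else if mAt cs i patIClose then
      if depth - 1 = 0 ∧ start ≥ 0 then
        loopA cs (i + 7) (depth - 1) (-1)
          (items ++ [String.ofList ((cs.drop start.toNat).take (i + 7 - start.toNat))])
      else loopA cs (i + 7) (depth - 1) start items
    else loopA cs (i + 1) depth start items
  else items
termination_by cs.length - i
decreasing_by
  · have := cdataScanA_ge cs (i + 9); omega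
  all_goals omega

def extract_item_blocks (xml_content : String) : List String :=
  loopA xml_content.toList 0 0 (-1) []

-- ===== PORT B =====
inductive PvTok where
  | copen | cclose | iopen | iclose
deriving DecidableEq, Repr

-- Source B's `_marker_events`: stateless left-to-right tokenizing pass
def tokenizeB (cs : List Char) (i : Nat) : List (Nat × PvTok) :=
  if i < cs.length then
    if mAt cs i patCOpen then (i, PvTok.copen) :: tokenizeB cs (i + 9)
    else if mAt cs i patCClose then (i, PvTok.cclose) :: tokenizeB cs (i + 3)
    else if mAt cs i patIOpen then (i, PvTok.iopen) :: tokenizeB cs (i + 6)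
    else if mAt cs i patIClose then (i, PvTok.iclose) :: tokenizeB cs (i + 7)
    else tokenizeB cs (i + 1)
  else []
termination_by cs.length - i
decreasing_by all_goals omega

-- Source B's interpreting `for pos, tok in events` loop
def interpB (cs : List Char) : List (Nat × PvTok) → Bool → Int → Int → List String → List String
  | [], _, _, _, items => items
  | (pos, tok) :: rest, inside, depth, start, items =>
    if inside then
      if tok = PvTok.cclose then interpB cs rest false depth start items
      else interpB cs rest true depth start items
    else if tok = PvTok.copen then interpB cs rest true depth start items
    else if tok = PvTok.iopen then
      interpB cs rest false (depth + 1) (if depth = 0 then (pos : Int) else start) items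
    else if tok = PvTok.iclose then
      if depth - 1 = 0 ∧ start ≥ 0 then
        interpB cs rest false (depth - 1) (-1)
          (items ++ [String.ofList ((cs.drop start.toNat).take (pos + 7 - start.toNat))])
      else interpB cs rest false (depth - 1) start items
    else interpB cs rest false depth start items

def extract_item_blocks_alt (xml_content : String) : List String :=
  interpB xml_content.toList (tokenizeB xml_content.toList 0) false 0 (-1) []

-- ===== PRECONDITION & SPEC =====
def Spec_extract_item_blocks (xml_content : String) (out : List String) : Prop := out = extract_item_blocks_alt xml_content
instance (xml_content : String) (out : List String) : Decidable (Spec_extract_item_blocks xml_content out) := by unfold Spec_extract_item_blocks; infer_instance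

-- ===== CLAIM (what is proved, stated in full; the proofs are below) =====
def Claim_equal_extract_item_blocks : Prop := ∀ (xml_content : String), Dom_extract_item_blocks xml_content → Spec_extract_item_blocks xml_content (extract_item_blocks xml_content)

-- ===== LEMMAS AND PROOFS =====

theorem mAt_char {cs pat : List Char} {i m : Nat} (h : mAt cs i pat = true)
    (hm : m < pat.length) : cs[i + m]? = pat[m]? := by
  unfold mAt at h
  rw [List.isPrefixOf_iff_prefix] at h
  obtain ⟨t, ht⟩ := h
  rw [← List.getElem?_drop, ← ht, List.getElem?_append_left hm]

theorem mAt_le {cs pat : List Char} {i : Nat} (h : mAt cs i pat = true) (h0 : pat ≠ []) :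
    i + pat.length ≤ cs.length := by
  unfold mAt at h
  rw [List.isPrefixOf_iff_prefix] at h
  have h1 := h.length_le
  rw [List.length_drop] at h1
  have h2 := List.length_pos_iff.2 h0
  omega

theorem mAt_false {cs pat1 pat2 : List Char} {i m : Nat} (h : mAt cs i pat1 = true)
    (hm : m < pat1.length) (h0 : pat2 ≠ []) (hne : pat1[m]? ≠ pat2[0]?) :
    mAt cs (i + m) pat2 = false := by
  by_contra hc
  rw [Bool.not_eq_false] at hc
  have a := mAt_char h hm
  have b := mAt_char hc (List.length_pos_iff.2 h0)
  rw [Nat.add_zero] at b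
  rw [a] at b
  exact hne b

theorem mAt_excl {cs pat1 pat2 : List Char} {i : Nat} (h : mAt cs i pat1 = true)
    (hm : pat1 ≠ []) (h0 : pat2 ≠ []) (hne : pat1[0]? ≠ pat2[0]?) :
    mAt cs i pat2 = false := by
  have := mAt_false h (List.length_pos_iff.2 hm) h0 hne
  rwa [Nat.add_zero] at this

theorem loopA_tail (cs : List Char) (i : Nat) (d s : Int) (it : List String)
    (h : cs.length ≤ i + 2) : loopA cs i d s it = it := by
  fun_induction loopA cs i d s it with
  | case1 i d s it hn hco ih =>
      exact absurd (mAt_le hco (by decide)) (by simp [patCOpen]; omega)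
  | case2 i d s it hn hco hio ih =>
      exact absurd (mAt_le hio (by decide)) (by simp [patIOpen]; omega)
  | case3 i d s it hn hco hio hic hcond =>
      exact absurd (mAt_le hic (by decide)) (by simp [patIClose]; omega)
  | case4 i d s it hn hco hio hic hcond ih =>
      exact absurd (mAt_le hic (by decide)) (by simp [patIClose]; omega)
  | case5 i d s it hn hco hio hic ih => exact ih (by omega)
  | case6 i d s it hn => rfl

theorem loopA_step1 (cs : List Char) (i : Nat) (d s : Int) (it : List String)
    (hn : i < cs.length) (h1 : mAt cs i patCOpen = false) (h2 : mAt cs i patIOpen = false)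
    (h3 : mAt cs i patIClose = false) : loopA cs i d s it = loopA cs (i + 1) d s it := by
  rw [loopA]
  simp [hn, h1, h2, h3]

theorem stepF (cs : List Char) (j : Nat) (d s : Int) (it : List String)
    (hnc : mAt cs j patCClose = false) :
    loopA cs (cdataScanA cs j) d s it = loopA cs (cdataScanA cs (j + 1)) d s it := by
  by_cases hj : j < cs.length - 2
  · rw [cdataScanA]
    simp [hj, hnc]
  · rw [cdataScanA, if_neg hj, loopA_tail _ _ _ _ _ (by omega), cdataScanA]
    have h2 : ¬ (j + 1 < cs.length - 2) := by omega
    rw [if_neg h2, loopA_tail _ _ _ _ _ (by omega)]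

theorem chainF (cs : List Char) (d s : Int) (it : List String) :
    ∀ len j, (∀ m, m < len → mAt cs (j + m) patCClose = false) →
    loopA cs (cdataScanA cs j) d s it = loopA cs (cdataScanA cs (j + len)) d s it := by
  intro len
  induction len with
  | zero => simp
  | succ L ihL =>
      intro j hm
      have h0 : mAt cs j patCClose = false := by
        have := hm 0 (by omega); rwa [Nat.add_zero] at this
      rw [stepF cs j d s it h0]
      have := ihL (j + 1) (fun m hm' => by
        have h2 := hm (m + 1) (by omega)
        rwa [show j + (m + 1) = j + 1 + m by omega] at h2)
      rwa [show j + 1 + L = j + (L + 1) by omega] at this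

theorem mainQR (cs : List Char) : ∀ k i, cs.length - i ≤ k → ∀ (d s : Int) (it : List String),
    loopA cs i d s it = interpB cs (tokenizeB cs i) false d s it ∧
    loopA cs (cdataScanA cs i) d s it = interpB cs (tokenizeB cs i) true d s it := by
  intro k
  induction k with
  | zero =>
      intro i hi d s it
      have hn : ¬ i < cs.length := by omega
      constructor
      · rw [loopA, if_neg hn, tokenizeB, if_neg hn, interpB]
      · rw [cdataScanA, if_neg (by omega), loopA, if_neg hn, tokenizeB, if_neg hn, interpB]
  | succ k ih =>
      intro i hi d s it
      by_cases hn : i < cs.length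
      · by_cases hco : mAt cs i patCOpen = true
        · -- "<![CDATA[" matches at i
          have hcc : mAt cs i patCClose = false :=
            mAt_excl hco (by decide) (by decide) (by decide)
          have hlen := mAt_le hco (by decide)
          constructor
          · rw [loopA, if_pos hn, if_pos hco, tokenizeB, if_pos hn, if_pos hco, interpB]
            simp only [Bool.false_eq_true, if_false, reduceIte]
            exact (ih (i + 9) (by omega) d s it).2
          · rw [tokenizeB, if_pos hn, if_pos hco, interpB]
            simp only [reduceIte]
            rw [chainF cs d s it 9 i ?_]
            · exact (ih (i + 9) (by omega) d s it).2
            · intro m hm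
              interval_cases m
              · rwa [Nat.add_zero]
              all_goals exact mAt_false hco (by decide) (by decide) (by decide)
        · rw [Bool.not_eq_true] at hco
          by_cases hcc : mAt cs i patCClose = true
          · -- "]]>" matches at i (outside a token start of the three '<'-markers)
            have hio : mAt cs i patIOpen = false :=
              mAt_excl hcc (by decide) (by decide) (by decide)
            have hic : mAt cs i patIClose = false :=
              mAt_excl hcc (by decide) (by decide) (by decide)
            have hlen : i + 3 ≤ cs.length := mAt_le hcc (by decide)
            constructor
            · -- top level: A walks over "]]>" char by char; B skips the event
              rw [loopA_step1 cs i d s it hn hco hio hic]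
              have e1 : mAt cs (i + 1) patCOpen = false :=
                mAt_false hcc (by decide) (by decide) (by decide)
              have e2 : mAt cs (i + 1) patIOpen = false :=
                mAt_false hcc (by decide) (by decide) (by decide)
              have e3 : mAt cs (i + 1) patIClose = false :=
                mAt_false hcc (by decide) (by decide) (by decide)
              rw [loopA_step1 cs (i + 1) d s it (by omega) e1 e2 e3]
              have f1 : mAt cs (i + 2) patCOpen = false :=
                mAt_false hcc (m := 2) (by decide) (by decide) (by decide)
              have f2 : mAt cs (i + 2) patIOpen = false :=
                mAt_false hcc (m := 2) (by decide) (by decide) (by decide)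
              have f3 : mAt cs (i + 2) patIClose = false :=
                mAt_false hcc (m := 2) (by decide) (by decide) (by decide)
              rw [loopA_step1 cs (i + 2) d s it (by omega) f1 f2 f3]
              rw [tokenizeB, if_pos hn, hco, hcc]
              simp only [Bool.false_eq_true, if_false, if_true]
              rw [interpB]
              simp only [reduceIte]
              have := (ih (i + 3) (by omega) d s it).1
              rwa [show i + 1 + 1 + 1 = i + 3 by omega]
            · -- inside CDATA: both close it at i+3
              rw [cdataScanA, if_pos (by omega), hcc]
              rw [tokenizeB, if_pos hn, hco, hcc]
              simp only [Bool.false_eq_true, if_false, if_true]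
              rw [interpB]
              simp only [reduceIte]
              exact (ih (i + 3) (by omega) d s it).1
          · rw [Bool.not_eq_true] at hcc
            by_cases hio : mAt cs i patIOpen = true
            · constructor
              · rw [loopA, if_pos hn, hco, hio, tokenizeB, if_pos hn, hco, hcc, hio]
                simp only [Bool.false_eq_true, if_false, if_true]
                rw [interpB]
                simp only [reduceIte]
                exact (ih (i + 6) (by omega) _ _ it).1
              · rw [tokenizeB, if_pos hn, hco, hcc, hio]
                simp only [Bool.false_eq_true, if_false, if_true]
                rw [interpB]
                simp only [reduceIte]
                rw [chainF cs d s it 6 i ?_]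
                · exact (ih (i + 6) (by omega) d s it).2
                · intro m hm
                  interval_cases m
                  · rwa [Nat.add_zero]
                  all_goals exact mAt_false hio (by decide) (by decide) (by decide)
            · rw [Bool.not_eq_true] at hio
              by_cases hic : mAt cs i patIClose = true
              · constructor
                · rw [loopA, if_pos hn, hco, hio, hic, tokenizeB, if_pos hn, hco, hcc, hio, hic]
                  simp only [Bool.false_eq_true, if_false, if_true]
                  rw [interpB]
                  simp only [reduceIte]
                  split
                  · exact (ih (i + 7) (by omega) _ _ _).1
                  · exact (ih (i + 7) (by omega) _ _ _).1
                · rw [tokenizeB, if_pos hn, hco, hcc, hio, hic]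
                  simp only [Bool.false_eq_true, if_false, if_true]
                  rw [interpB]
                  simp only [reduceIte]
                  rw [chainF cs d s it 7 i ?_]
                  · exact (ih (i + 7) (by omega) d s it).2
                  · intro m hm
                    interval_cases m
                    · rwa [Nat.add_zero]
                    all_goals exact mAt_false hic (by decide) (by decide) (by decide)
              · rw [Bool.not_eq_true] at hic
                -- no marker at i
                constructor
                · rw [loopA_step1 cs i d s it hn hco hio hic]
                  rw [tokenizeB, if_pos hn, hco, hcc, hio, hic]
                  simp only [Bool.false_eq_true, if_false]
                  exact (ih (i + 1) (by omega) d s it).1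
                · rw [stepF cs i d s it hcc]
                  rw [tokenizeB, if_pos hn, hco, hcc, hio, hic]
                  simp only [Bool.false_eq_true, if_false]
                  exact (ih (i + 1) (by omega) d s it).2
      · have hn2 : ¬ i < cs.length - 2 := by omega
        constructor
        · rw [loopA, if_neg hn, tokenizeB, if_neg hn, interpB]
        · rw [cdataScanA, if_neg hn2, loopA, if_neg hn, tokenizeB, if_neg hn, interpB]

-- ===== VERDICT (by name: the statement is the Claim_ definition above) =====
theorem extract_item_blocks_spec : Claim_equal_extract_item_blocks := by
  intro x _
  unfold Spec_extract_item_blocks extract_item_blocks extract_item_blocks_alt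
  exact (mainQR x.toList x.toList.length 0 (by omega) 0 (-1) []).1
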